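-- pv_equiv track=rewrite | github.com/ziajek444/MyPython | Octabyte/octabyte.py | octabyte_to_dec
-- ===== SOURCE A (Python) =====
-- OCTABYTEARR = "0123456789qwertyuiopasdfghjklzxcvbnmQWERTYUIOPASDFGHJKLZXCVBNM@#"
--
-- def octabyte_to_dec(num:str):
--     decVal = 0
--     pureNum = num[2:]
--     iter = 1
--     for e in pureNum[::-1]:
--         decVal += OCTABYTEARR.find(e) * iter
--         iter *= 64
--     return decVal
-- ===== SOURCE B (Python) =====
-- OCTABYTEARR = "0123456789qwertyuiopasdfghjklzxcvbnmQWERTYUIOPASDFGHJKLZXCVBNM@#"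
--
-- def octabyte_to_dec(num: str):
--     decVal = 0
--     for e in num[2:]:
--         decVal = decVal * 64 + OCTABYTEARR.find(e)
--     return decVal
-- ===== Notes on version B (the rewrite author's own statement) =====
-- stated objective: idiomatic
-- what changed: Replaces the reversed iteration with an explicit power-of-64 multiplier by a forward Horner fold (decVal = decVal*64 + digit), dropping the reversal and the iter accumulator.
import Mathlib
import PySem

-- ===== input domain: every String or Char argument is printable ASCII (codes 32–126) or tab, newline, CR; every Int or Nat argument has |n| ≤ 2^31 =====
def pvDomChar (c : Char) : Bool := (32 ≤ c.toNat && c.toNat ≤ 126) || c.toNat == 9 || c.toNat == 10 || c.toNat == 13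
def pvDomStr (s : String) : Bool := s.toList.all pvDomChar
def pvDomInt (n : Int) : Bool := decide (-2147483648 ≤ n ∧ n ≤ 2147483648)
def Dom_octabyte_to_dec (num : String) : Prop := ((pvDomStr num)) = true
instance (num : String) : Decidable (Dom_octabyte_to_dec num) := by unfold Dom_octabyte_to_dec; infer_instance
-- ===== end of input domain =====

-- B replaces A's reversed iteration with an explicit power-of-64 multiplier by a forward
-- Horner fold (decVal = decVal*64 + digit); objective: idiomatic. Return-value equivalence only.

def OCTABYTEARR : String := "0123456789qwertyuiopasdfghjklzxcvbnmQWERTYUIOPASDFGHJKLZXCVBNM@#"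

-- ===== PORT A =====
-- pureNum[::-1] is list reversal (PySem.Str.slice?_none_none_neg_one); the loop carries (decVal, iter).
def octabyte_to_dec (num : String) : Int :=
  let pureNum := (PySem.Str.slice num (some 2) none).toList
  let st := pureNum.reverse.foldl
    (fun (st : Int × Int) e =>
      (st.1 + PySem.Str.find OCTABYTEARR (String.ofList [e]) * st.2, st.2 * 64)) (0, 1)
  st.1

-- ===== PORT B =====
def octabyte_to_dec_alt (num : String) : Int :=
  (PySem.Str.slice num (some 2) none).toList.foldl
    (fun decVal e => decVal * 64 + PySem.Str.find OCTABYTEARR (String.ofList [e])) 0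

-- ===== PRECONDITION & SPEC =====
def Spec_octabyte_to_dec (num : String) (out : Int) : Prop := out = octabyte_to_dec_alt num
instance (num : String) (out : Int) : Decidable (Spec_octabyte_to_dec num out) := by unfold Spec_octabyte_to_dec; infer_instance

-- ===== CLAIM (what is proved, stated in full; the proofs are below) =====
def Claim_equal_octabyte_to_dec : Prop := ∀ (num : String), Dom_octabyte_to_dec num → Spec_octabyte_to_dec num (octabyte_to_dec num)

-- ===== LEMMAS AND PROOFS =====

-- Horner fold with arbitrary initial accumulator.
theorem horner_init (f : Char → Int) (t : List Char) (a : Int) :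
    t.foldl (fun d e => d * 64 + f e) a
      = a * 64 ^ t.length + t.foldl (fun d e => d * 64 + f e) 0 := by
  induction t generalizing a with
  | nil => simp
  | cons e t ih =>
      simp only [List.foldl_cons, List.length_cons]
      rw [ih (a * 64 + f e), ih (0 * 64 + f e)]
      ring

-- A's pair-state fold over the reversed list, characterised by the Horner value.
theorem foldr_horner (f : Char → Int) (t : List Char) (d p : Int) :
    t.foldr (fun e (st : Int × Int) => (st.1 + f e * st.2, st.2 * 64)) (d, p)
      = (d + p * t.foldl (fun d e => d * 64 + f e) 0, p * 64 ^ t.length) := by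
  induction t generalizing d p with
  | nil => simp
  | cons e t ih =>
      simp only [List.foldr_cons, List.length_cons, List.foldl_cons, ih]
      rw [horner_init f t (0 * 64 + f e)]
      refine Prod.ext ?_ ?_ <;> simp <;> ring

theorem octabyte_to_dec_spec : Claim_equal_octabyte_to_dec := by
  intro num _
  show octabyte_to_dec num = octabyte_to_dec_alt num
  unfold octabyte_to_dec octabyte_to_dec_alt
  simp only [List.foldl_reverse]
  rw [foldr_horner (fun e => PySem.Str.find OCTABYTEARR (String.ofList [e]))]
  simp
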